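-- pv_equiv track=rewrite | github.com/Batcat72/OSINT | code.py | detect_platforms
-- ===== SOURCE A (Python) =====
-- def detect_platforms(links):
--     platforms = {
--         "instagram": [],
--         "github": [],
--         "twitter": [],
--         "facebook": [],
--         "linkedin": []
--     }
--     for link in links:
--         l = link.lower()
--         if "instagram.com/" in l:
--             platforms["instagram"].append(link)
--         elif "github.com/" in l and l.count("/") == 3:
--             platforms["github"].append(link)
--         elif "twitter.com/" in l or "x.com/" in l:
--             platforms["twitter"].append(link)
--         elif "facebook.com/" in l:
--             platforms["facebook"].append(link)
--         elif "linkedin.com/in/" in l: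
--             platforms["linkedin"].append(link)
--     return platforms
-- ===== SOURCE B (Python) =====
-- def detect_platforms(links):
--     def is_instagram(l):
--         return "instagram.com/" in l
--
--     def is_github(l):
--         return not is_instagram(l) and "github.com/" in l and l.count("/") == 3
--
--     def is_twitter(l):
--         return (not is_instagram(l) and not is_github(l)
--                 and ("twitter.com/" in l or "x.com/" in l))
--
--     def is_facebook(l):
--         return (not is_instagram(l) and not is_github(l)
--                 and not is_twitter(l) and "facebook.com/" in l)
--
--     def is_linkedin(l):
--         return (not is_instagram(l) and not is_github(l) and not is_twitter(l)
--                 and not is_facebook(l) and "linkedin.com/in/" in l)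
--
--     return {
--         "instagram": [x for x in links if is_instagram(x.lower())],
--         "github":    [x for x in links if is_github(x.lower())],
--         "twitter":   [x for x in links if is_twitter(x.lower())],
--         "facebook":  [x for x in links if is_facebook(x.lower())],
--         "linkedin":  [x for x in links if is_linkedin(x.lower())],
--     }
-- ===== Notes on version B (the rewrite author's own statement) =====
-- stated objective: alternative
-- what changed: Replaces the single per-link if/elif dispatch loop mutating a dict of buckets by five standalone disjoint predicates and five independent filter passes, one comprehension per platform, building each bucket (and the dict) directly.
import Mathlib
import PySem

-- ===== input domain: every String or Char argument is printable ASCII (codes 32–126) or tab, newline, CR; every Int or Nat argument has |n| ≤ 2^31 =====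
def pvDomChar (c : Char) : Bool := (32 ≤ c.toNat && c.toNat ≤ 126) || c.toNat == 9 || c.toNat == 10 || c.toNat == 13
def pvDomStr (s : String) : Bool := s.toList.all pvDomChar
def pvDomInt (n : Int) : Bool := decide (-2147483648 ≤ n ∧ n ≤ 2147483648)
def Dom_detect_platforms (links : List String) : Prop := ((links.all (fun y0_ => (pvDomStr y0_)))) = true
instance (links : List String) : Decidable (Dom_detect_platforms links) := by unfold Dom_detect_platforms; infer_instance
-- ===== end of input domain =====

-- B replaces A's per-link if/elif dispatch into a mutated dict by five disjoint predicates and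
-- five independent filter passes, one per platform bucket (alternative decomposition, same cost).


-- ===== PORT A =====
def detectStep (d : PySem.Dict String (List String)) (link : String) : PySem.Dict String (List String) :=
  let l := PySem.Str.lower link
  if PySem.Str.isIn "instagram.com/" l then
    d.modify "instagram" [] (· ++ [link])
  else if PySem.Str.isIn "github.com/" l && PySem.Str.count l "/" == 3 then
    d.modify "github" [] (· ++ [link])
  else if PySem.Str.isIn "twitter.com/" l || PySem.Str.isIn "x.com/" l then
    d.modify "twitter" [] (· ++ [link])
  else if PySem.Str.isIn "facebook.com/" l then
    d.modify "facebook" [] (· ++ [link])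
  else if PySem.Str.isIn "linkedin.com/in/" l then
    d.modify "linkedin" [] (· ++ [link])
  else d

def detect_platforms (links : List String) : List (String × List String) :=
  let platforms : PySem.Dict String (List String) :=
    PySem.Dict.ofList
      [("instagram", []), ("github", []), ("twitter", []), ("facebook", []), ("linkedin", [])]
  (links.foldl detectStep platforms).items

-- ===== PORT B =====
def isInstagram (l : String) : Bool := PySem.Str.isIn "instagram.com/" l
def isGithub (l : String) : Bool :=
  !isInstagram l && (PySem.Str.isIn "github.com/" l && PySem.Str.count l "/" == 3)
def isTwitter (l : String) : Bool :=
  !isInstagram l && !isGithub l && (PySem.Str.isIn "twitter.com/" l || PySem.Str.isIn "x.com/" l)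
def isFacebook (l : String) : Bool :=
  !isInstagram l && !isGithub l && !isTwitter l && PySem.Str.isIn "facebook.com/" l
def isLinkedin (l : String) : Bool :=
  !isInstagram l && !isGithub l && !isTwitter l && !isFacebook l &&
    PySem.Str.isIn "linkedin.com/in/" l

def detect_platforms_alt (links : List String) : List (String × List String) :=
  [("instagram", links.filter (fun x => isInstagram (PySem.Str.lower x))),
   ("github",    links.filter (fun x => isGithub (PySem.Str.lower x))),
   ("twitter",   links.filter (fun x => isTwitter (PySem.Str.lower x))),
   ("facebook",  links.filter (fun x => isFacebook (PySem.Str.lower x))),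
   ("linkedin",  links.filter (fun x => isLinkedin (PySem.Str.lower x)))]

-- ===== PRECONDITION & SPEC =====
def Spec_detect_platforms (links : List String) (out : List (String × List String)) : Prop := out = detect_platforms_alt links
instance (links : List String) (out : List (String × List String)) : Decidable (Spec_detect_platforms links out) := by unfold Spec_detect_platforms; infer_instance

-- ===== CLAIM (what is proved, stated in full; the proofs are below) =====
def Claim_equal_detect_platforms : Prop := ∀ (links : List String), Dom_detect_platforms links → Spec_detect_platforms links (detect_platforms links)

-- ===== LEMMAS AND PROOFS =====
-- One step of A's loop, with the seven atomic tests abstracted as Bools: the if/elif chain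
-- updates the literal five-key dict exactly as B's five disjoint predicates say.
lemma step_abs (bI bG bC bT bX bF bL : Bool) (a b c d e : List String) (x : String) :
    (if bI then
       (PySem.Dict.mk [("instagram", a), ("github", b), ("twitter", c), ("facebook", d), ("linkedin", e)]).modify "instagram" [] (· ++ [x])
     else if bG && bC then
       (PySem.Dict.mk [("instagram", a), ("github", b), ("twitter", c), ("facebook", d), ("linkedin", e)]).modify "github" [] (· ++ [x])
     else if bT || bX then
       (PySem.Dict.mk [("instagram", a), ("github", b), ("twitter", c), ("facebook", d), ("linkedin", e)]).modify "twitter" [] (· ++ [x])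
     else if bF then
       (PySem.Dict.mk [("instagram", a), ("github", b), ("twitter", c), ("facebook", d), ("linkedin", e)]).modify "facebook" [] (· ++ [x])
     else if bL then
       (PySem.Dict.mk [("instagram", a), ("github", b), ("twitter", c), ("facebook", d), ("linkedin", e)]).modify "linkedin" [] (· ++ [x])
     else
       PySem.Dict.mk [("instagram", a), ("github", b), ("twitter", c), ("facebook", d), ("linkedin", e)])
    = PySem.Dict.mk
        [("instagram", if bI then a ++ [x] else a),
         ("github",    if !bI && (bG && bC) then b ++ [x] else b),
         ("twitter",   if !bI && !(!bI && (bG && bC)) && (bT || bX) then c ++ [x] else c),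
         ("facebook",  if !bI && !(!bI && (bG && bC)) && !(!bI && !(!bI && (bG && bC)) && (bT || bX)) && bF then d ++ [x] else d),
         ("linkedin",  if !bI && !(!bI && (bG && bC)) && !(!bI && !(!bI && (bG && bC)) && (bT || bX)) &&
                          !(!bI && !(!bI && (bG && bC)) && !(!bI && !(!bI && (bG && bC)) && (bT || bX)) && bF) && bL
                       then e ++ [x] else e)] := by
  cases bI <;> cases bG <;> cases bC <;> cases bT <;> cases bX <;> cases bF <;> cases bL <;> rfl

lemma detect_loop (links : List String) :
    ∀ (a b c d e : List String),
      (links.foldl detectStep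
        (PySem.Dict.mk
          [("instagram", a), ("github", b), ("twitter", c), ("facebook", d), ("linkedin", e)])).items
      = [("instagram", a ++ links.filter (fun x => isInstagram (PySem.Str.lower x))),
         ("github",    b ++ links.filter (fun x => isGithub (PySem.Str.lower x))),
         ("twitter",   c ++ links.filter (fun x => isTwitter (PySem.Str.lower x))),
         ("facebook",  d ++ links.filter (fun x => isFacebook (PySem.Str.lower x))),
         ("linkedin",  e ++ links.filter (fun x => isLinkedin (PySem.Str.lower x)))] := by
  induction links with
  | nil => intro a b c d e; simp
  | cons x xs ih =>
    intro a b c d e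
    rw [List.foldl_cons]
    have hstep : detectStep
        (PySem.Dict.mk [("instagram", a), ("github", b), ("twitter", c), ("facebook", d), ("linkedin", e)]) x
        = PySem.Dict.mk
            [("instagram", if isInstagram (PySem.Str.lower x) then a ++ [x] else a),
             ("github",    if isGithub (PySem.Str.lower x) then b ++ [x] else b),
             ("twitter",   if isTwitter (PySem.Str.lower x) then c ++ [x] else c),
             ("facebook",  if isFacebook (PySem.Str.lower x) then d ++ [x] else d),
             ("linkedin",  if isLinkedin (PySem.Str.lower x) then e ++ [x] else e)] :=
      step_abs (PySem.Str.isIn "instagram.com/" (PySem.Str.lower x))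
        (PySem.Str.isIn "github.com/" (PySem.Str.lower x))
        (PySem.Str.count (PySem.Str.lower x) "/" == 3)
        (PySem.Str.isIn "twitter.com/" (PySem.Str.lower x))
        (PySem.Str.isIn "x.com/" (PySem.Str.lower x))
        (PySem.Str.isIn "facebook.com/" (PySem.Str.lower x))
        (PySem.Str.isIn "linkedin.com/in/" (PySem.Str.lower x)) a b c d e x
    rw [hstep, ih]
    simp only [List.filter_cons]
    split_ifs <;> simp

theorem detect_platforms_spec : Claim_equal_detect_platforms := by
  intro links _
  unfold Spec_detect_platforms detect_platforms detect_platforms_alt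
  have h0 : (PySem.Dict.ofList
      [("instagram", ([] : List String)), ("github", []), ("twitter", []), ("facebook", []), ("linkedin", [])])
      = PySem.Dict.mk
      [("instagram", []), ("github", []), ("twitter", []), ("facebook", []), ("linkedin", [])] := by decide
  simp only [h0, detect_loop, List.nil_append]
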